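-- pv_equiv track=rewrite | github.com/zejiran/python-for-cats | !awesome_challenges/challenges_vol4.py | hacer_la_vaca
-- ===== SOURCE A (Python) =====
-- def hacer_la_vaca(salon: list, vaca: str) -> tuple:
--     """ Vaca de Cumpleaños
--     Parámetros:
--       salon (list): Matriz que representa el salón de estudiantes y con enteros que representan cuanto
--                     dinero aportarán
--       vaca (str): Cadena que indica qué vaca se está realizando, esta puede ser 'botella' o 'pastel'
--     Retorno:
--       tuple: Tupla cuya primera posición es un str de la forma 'Hay Vaca' si se alcanzó la vaca, y 'No Alcanza'
--              de lo contrario, y las siguientes dos posiciones son las coordenadas del estudiante qué más dinero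
--              aportó.
--     """
--     el_rico = [0, 0]
--     regalon_del_rico = 0
--     hay_vaca = False
--     if vaca == 'botella':
--         recolecta = 120000
--     elif vaca == 'pastel':
--         recolecta = 35000
--     else:
--         recolecta = -1000000000000000
--     i = 0
--     while i < len(salon):
--         j = 0
--         while j < len(salon[i]):
--             aporte_estudiante = salon[i][j]
--             # Verificar el mayor aporte.
--             if regalon_del_rico < aporte_estudiante:
--                 regalon_del_rico = aporte_estudiante
--                 el_rico = [i, j]
--             # Restar a la vaca.
--             recolecta -= aporte_estudiante
--             if recolecta <= 0 and recolecta != -1000000000000000: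
--                 hay_vaca = True
--             else:
--                 hay_vaca = False
--             j += 1
--         i += 1
--     if hay_vaca:
--         retorno = 'Hay Vaca'
--     else:
--         retorno = 'No Alcanza'
--     el_rico.insert(0, retorno)
--     return tuple(el_rico)
-- ===== SOURCE B (Python) =====
-- def hacer_la_vaca(salon: list, vaca: str) -> tuple:
--     if vaca == 'botella':
--         recolecta = 120000
--     elif vaca == 'pastel':
--         recolecta = 35000
--     else:
--         recolecta = -1000000000000000
--     cells = [(i, j, v) for i, row in enumerate(salon) for j, v in enumerate(row)]
--     restante = recolecta - sum(v for _, _, v in cells)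
--     retorno = 'Hay Vaca' if (restante <= 0 and restante != -1000000000000000) else 'No Alcanza'
--     mayor = max((v for _, _, v in cells), default=0)
--     if mayor > 0:
--         i, j = next((i, j) for i, j, v in cells if v == mayor)
--     else:
--         i, j = 0, 0
--     return (retorno, i, j)
-- ===== Notes on version B (the rewrite author's own statement) =====
-- stated objective: simpler
-- what changed: B replaces A's nested while loops with four pieces of running state (running argmax, per-cell re-computed 'hay_vaca' flag, running remainder) by a flat list of (i,j,v) cells, a closed-form threshold test on the total sum, and max-then-first-occurrence lookup for the richest coordinates.
import Mathlib
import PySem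

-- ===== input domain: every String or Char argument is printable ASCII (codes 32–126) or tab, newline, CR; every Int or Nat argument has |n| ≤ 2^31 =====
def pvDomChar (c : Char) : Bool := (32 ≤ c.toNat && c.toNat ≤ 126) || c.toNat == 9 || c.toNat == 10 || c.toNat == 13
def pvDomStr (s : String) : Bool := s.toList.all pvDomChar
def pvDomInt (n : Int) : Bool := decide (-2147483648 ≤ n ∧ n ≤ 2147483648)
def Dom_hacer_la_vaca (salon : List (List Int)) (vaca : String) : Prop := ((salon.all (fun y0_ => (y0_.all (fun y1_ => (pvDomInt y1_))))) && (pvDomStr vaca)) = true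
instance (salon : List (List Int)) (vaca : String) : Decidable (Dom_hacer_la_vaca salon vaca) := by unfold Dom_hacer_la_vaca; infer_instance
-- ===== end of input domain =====

-- B replaces A's nested while loops with running state by a flat cell list, a closed-form
-- threshold test on the total, and max-then-first-occurrence for the richest coordinates (simpler).

-- ===== PORT A =====
-- state: (el_rico, regalon_del_rico, hay_vaca, recolecta)
def pvStepA (st : (Int × Int) × Int × Bool × Int) (c : Int × Int × Int) :
    (Int × Int) × Int × Bool × Int :=
  let reg' := if st.2.1 < c.2.2 then c.2.2 else st.2.1
  let rico' := if st.2.1 < c.2.2 then (c.1, c.2.1) else st.1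
  let rec' := st.2.2.2 - c.2.2
  (rico', reg', decide (rec' ≤ 0 ∧ rec' ≠ -1000000000000000), rec')

def pvRowA (i : Int) (row : List Int) (j : Int) (st : (Int × Int) × Int × Bool × Int) :
    (Int × Int) × Int × Bool × Int :=
  match row with
  | [] => st
  | v :: rest => pvRowA i rest (j + 1) (pvStepA st (i, j, v))

def pvOutA (rows : List (List Int)) (i : Int) (st : (Int × Int) × Int × Bool × Int) :
    (Int × Int) × Int × Bool × Int :=
  match rows with
  | [] => st
  | row :: rest => pvOutA rest (i + 1) (pvRowA i row 0 st)

def hacer_la_vaca (salon : List (List Int)) (vaca : String) : String × Int × Int :=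
  let recolecta : Int :=
    if vaca = "botella" then 120000
    else if vaca = "pastel" then 35000
    else -1000000000000000
  let st := pvOutA salon 0 ((0, 0), 0, false, recolecta)
  ((if st.2.2.1 then "Hay Vaca" else "No Alcanza"), st.1)

-- ===== PORT B =====
def pvCells (salon : List (List Int)) : List (Int × Int × Int) :=
  (PySem.List.enumerate salon).flatMap
    (fun p => (PySem.List.enumerate p.2).map (fun q => (p.1, q.1, q.2)))

def hacer_la_vaca_alt (salon : List (List Int)) (vaca : String) : String × Int × Int :=
  let recolecta : Int :=
    if vaca = "botella" then 120000
    else if vaca = "pastel" then 35000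
    else -1000000000000000
  let cells := pvCells salon
  let vals := cells.map (fun c => c.2.2)
  let restante := recolecta - vals.sum
  let retorno := if restante ≤ 0 ∧ restante ≠ -1000000000000000 then "Hay Vaca" else "No Alcanza"
  let mayor := PySem.List.maxD vals (fun v => v) 0
  let ij : Int × Int :=
    if 0 < mayor then
      match cells.find? (fun c => c.2.2 == mayor) with
      | some c => (c.1, c.2.1)
      | none => (0, 0)
    else (0, 0)
  (retorno, ij.1, ij.2)

-- ===== PRECONDITION & SPEC =====
def Spec_hacer_la_vaca (salon : List (List Int)) (vaca : String) (out : String × Int × Int) : Prop := out = hacer_la_vaca_alt salon vaca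
instance (salon : List (List Int)) (vaca : String) (out : String × Int × Int) : Decidable (Spec_hacer_la_vaca salon vaca out) := by unfold Spec_hacer_la_vaca; infer_instance

-- ===== CLAIM (what is proved, stated in full; the proofs are below) =====
def Claim_equal_hacer_la_vaca : Prop := ∀ (salon : List (List Int)) (vaca : String), Dom_hacer_la_vaca salon vaca → Spec_hacer_la_vaca salon vaca (hacer_la_vaca salon vaca)

-- ===== LEMMAS AND PROOFS =====

theorem pv_foldl_max_max (l : List Int) (a : Int) : ∀ b : Int, l.foldl max (max a b) = max a (l.foldl max b) := by
  induction l with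
  | nil => intro b; rfl
  | cons x t ih =>
      intro b
      simpa [List.foldl_cons, max_assoc] using ih (max b x)

theorem pv_rowA_foldl (row : List Int) : ∀ (i j : Int) (st : (Int × Int) × Int × Bool × Int),
    pvRowA i row j st =
      List.foldl pvStepA st ((PySem.List.enumerate row j).map (fun q => (i, q.1, q.2))) := by
  induction row with
  | nil => intro i j st; simp [pvRowA, PySem.List.enumerate_nil]
  | cons v rest ih =>
      intro i j st
      simp [pvRowA, PySem.List.enumerate_cons, ih]

theorem pv_outA_foldl (rows : List (List Int)) : ∀ (i : Int) (st : (Int × Int) × Int × Bool × Int),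
    pvOutA rows i st =
      List.foldl pvStepA st
        ((PySem.List.enumerate rows i).flatMap
          (fun p => (PySem.List.enumerate p.2).map (fun q => (p.1, q.1, q.2)))) := by
  induction rows with
  | nil => intro i st; simp [pvOutA, PySem.List.enumerate_nil]
  | cons row rest ih =>
      intro i st
      simp [pvOutA, PySem.List.enumerate_cons, List.flatMap_cons, List.foldl_append,
        ih, pv_rowA_foldl]

theorem pv_hayA (L : List (Int × Int × Int)) : ∀ st : (Int × Int) × Int × Bool × Int, L ≠ [] →
    (List.foldl pvStepA st L).2.2.1 =
      decide ((st.2.2.2 - (L.map (fun c => c.2.2)).sum) ≤ 0 ∧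
              (st.2.2.2 - (L.map (fun c => c.2.2)).sum) ≠ -1000000000000000) := by
  induction L with
  | nil => intro st h; exact absurd rfl h
  | cons c rest ih =>
      intro st _
      by_cases hr : rest = []
      · subst hr
        simp only [List.foldl_cons, List.foldl_nil, List.map_cons, List.map_nil, List.sum_cons,
          List.sum_nil, pvStepA]
        rw [decide_eq_decide]
        constructor <;> (rintro ⟨h1, h2⟩; constructor <;> omega)
      · rw [List.foldl_cons, ih _ hr]
        have : (pvStepA st c).2.2.2 = st.2.2.2 - c.2.2 := rfl
        rw [this, decide_eq_decide]
        simp only [List.map_cons, List.sum_cons]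
        constructor <;> (rintro ⟨h1, h2⟩; constructor <;> omega)

theorem pv_foldl_max_mem (l : List Int) : ∀ a : Int, l.foldl max a = a ∨ l.foldl max a ∈ l := by
  induction l with
  | nil => intro a; left; rfl
  | cons x t ih =>
      intro a
      rcases ih (max a x) with h | h
      · rw [List.foldl_cons, h]
        by_cases hax : x ≤ a
        · left; exact max_eq_left hax
        · right; rw [max_eq_right (le_of_not_ge hax)]; exact List.mem_cons_self
      · right
        rw [List.foldl_cons]
        exact List.mem_cons_of_mem _ h

theorem pv_argmaxA (L : List (Int × Int × Int)) :
    ∀ (rico : Int × Int) (reg : Int) (h : Bool) (rc : Int),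
    ((List.foldl pvStepA (rico, reg, h, rc) L).1,
     (List.foldl pvStepA (rico, reg, h, rc) L).2.1) =
      (match L.find? (fun c => decide (reg < c.2.2) &&
          (c.2.2 == (L.map (fun c => c.2.2)).foldl max reg)) with
       | some c => ((c.1, c.2.1), (L.map (fun c => c.2.2)).foldl max reg)
       | none => (rico, reg)) := by
  induction L with
  | nil => intro rico reg h rc; simp
  | cons c rest ih =>
      intro rico reg h rc
      rw [List.foldl_cons]
      by_cases hlt : reg < c.2.2
      · have hstate : pvStepA (rico, reg, h, rc) c =
            ((c.1, c.2.1), c.2.2,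
             decide (rc - c.2.2 ≤ 0 ∧ rc - c.2.2 ≠ -1000000000000000), rc - c.2.2) := by
          simp [pvStepA, hlt]
        rw [hstate, ih]
        have hM : ((c :: rest).map (fun c => c.2.2)).foldl max reg =
            (rest.map (fun c => c.2.2)).foldl max c.2.2 := by
          simp [List.foldl_cons, max_eq_right (le_of_lt hlt)]
        by_cases hv : c.2.2 = (rest.map (fun c => c.2.2)).foldl max c.2.2
        · -- the head attains the maximum
          have hnone : rest.find? (fun c' => decide (c.2.2 < c'.2.2) &&
              (c'.2.2 == (rest.map (fun c => c.2.2)).foldl max c.2.2)) = none := by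
            rw [List.find?_eq_none]
            intro x _
            by_cases hxv : x.2.2 = (rest.map (fun c => c.2.2)).foldl max c.2.2
            · simp [hxv, ← hv]
            · have h1 : (x.2.2 == (rest.map (fun c => c.2.2)).foldl max c.2.2) = false :=
                beq_eq_false_iff_ne.mpr hxv
              simp [h1]
          have hpc : (decide (reg < c.2.2) &&
              (c.2.2 == ((c :: rest).map (fun c => c.2.2)).foldl max reg)) = true := by
            rw [hM, ← hv]
            simp [hlt]
          have hfind : (c :: rest).find? (fun c' => decide (reg < c'.2.2) &&
              (c'.2.2 == ((c :: rest).map (fun c => c.2.2)).foldl max reg)) = some c :=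
            List.find?_cons_of_pos hpc
          rw [hnone, hfind, hM, ← hv]
        · -- the maximum lies strictly inside rest
          have hle : c.2.2 ≤ (rest.map (fun c => c.2.2)).foldl max c.2.2 :=
            (PySem.List.le_foldl_max _ _).1
          have hvlt : c.2.2 < (rest.map (fun c => c.2.2)).foldl max c.2.2 :=
            lt_of_le_of_ne hle hv
          have hheadfalse : (decide (reg < c.2.2) &&
              (c.2.2 == ((c :: rest).map (fun c => c.2.2)).foldl max reg)) = false := by
            rw [hM]
            have h1 : (c.2.2 == (rest.map (fun c => c.2.2)).foldl max c.2.2) = false :=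
              beq_eq_false_iff_ne.mpr hv
            rw [h1, Bool.and_false]
          have hhead : (c :: rest).find? (fun c' => decide (reg < c'.2.2) &&
              (c'.2.2 == ((c :: rest).map (fun c => c.2.2)).foldl max reg)) =
              rest.find? (fun c' => decide (reg < c'.2.2) &&
              (c'.2.2 == ((c :: rest).map (fun c => c.2.2)).foldl max reg)) :=
            List.find?_cons_of_neg (by simp only [hheadfalse]; decide)
          have hpeq : (fun c' : Int × Int × Int => decide (reg < c'.2.2) &&
                (c'.2.2 == ((c :: rest).map (fun c => c.2.2)).foldl max reg)) =
              (fun c' : Int × Int × Int => decide (c.2.2 < c'.2.2) &&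
                (c'.2.2 == (rest.map (fun c => c.2.2)).foldl max c.2.2)) := by
            funext c'
            rw [hM]
            by_cases hc' : c'.2.2 = (rest.map (fun c => c.2.2)).foldl max c.2.2
            · rw [hc']
              have h1 : reg < (rest.map (fun c => c.2.2)).foldl max c.2.2 :=
                lt_trans hlt hvlt
              simp [h1, hvlt]
            · have h1 : (c'.2.2 == (rest.map (fun c => c.2.2)).foldl max c.2.2) = false :=
                beq_eq_false_iff_ne.mpr hc'
              rw [h1, Bool.and_false, Bool.and_false]
          rw [hhead, hpeq, hM]
          rcases hfind : rest.find? (fun c' => decide (c.2.2 < c'.2.2) &&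
              (c'.2.2 == (rest.map (fun c => c.2.2)).foldl max c.2.2)) with _ | c'
          · exfalso
            rcases pv_foldl_max_mem (rest.map (fun c => c.2.2)) c.2.2 with hmm | hmm
            · exact hv hmm.symm
            · rcases List.mem_map.mp hmm with ⟨x, hx, hxv⟩
              exact List.find?_eq_none.mp hfind x hx (by simp [hxv, hvlt])
          · rw [hfind]
      · -- no update of the running maximum
        have hstate : pvStepA (rico, reg, h, rc) c =
            (rico, reg,
             decide (rc - c.2.2 ≤ 0 ∧ rc - c.2.2 ≠ -1000000000000000), rc - c.2.2) := by
          simp [pvStepA, hlt]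
        rw [hstate, ih]
        have hM : ((c :: rest).map (fun c => c.2.2)).foldl max reg =
            (rest.map (fun c => c.2.2)).foldl max reg := by
          simp [List.foldl_cons, max_eq_left (le_of_not_gt hlt)]
        have hhead : (c :: rest).find? (fun c' => decide (reg < c'.2.2) &&
            (c'.2.2 == ((c :: rest).map (fun c => c.2.2)).foldl max reg)) =
            rest.find? (fun c' => decide (reg < c'.2.2) &&
            (c'.2.2 == ((c :: rest).map (fun c => c.2.2)).foldl max reg)) :=
          List.find?_cons_of_neg (by simp [hlt])
        rw [hhead, hM]

theorem pv_out_cells (salon : List (List Int)) (st : (Int × Int) × Int × Bool × Int) :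
    pvOutA salon 0 st = List.foldl pvStepA st (pvCells salon) := by
  rw [pv_outA_foldl]; rfl

theorem pv_main (C : List (Int × Int × Int)) (rec0 : Int)
    (hrec : rec0 = 120000 ∨ rec0 = 35000 ∨ rec0 = -1000000000000000) :
    ((if (List.foldl pvStepA ((0, 0), 0, false, rec0) C).2.2.1 = true
        then "Hay Vaca" else "No Alcanza"),
      (List.foldl pvStepA ((0, 0), 0, false, rec0) C).1) =
    ((if rec0 - (C.map (fun c => c.2.2)).sum ≤ 0 ∧
          rec0 - (C.map (fun c => c.2.2)).sum ≠ -1000000000000000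
        then "Hay Vaca" else "No Alcanza"),
      (if 0 < PySem.List.maxD (C.map (fun c => c.2.2)) (fun v => v) 0 then
          match C.find? (fun c => c.2.2 == PySem.List.maxD (C.map (fun c => c.2.2)) (fun v => v) 0) with
          | some c => (c.1, c.2.1)
          | none => ((0 : Int), (0 : Int))
        else ((0 : Int), (0 : Int))).1,
      (if 0 < PySem.List.maxD (C.map (fun c => c.2.2)) (fun v => v) 0 then
          match C.find? (fun c => c.2.2 == PySem.List.maxD (C.map (fun c => c.2.2)) (fun v => v) 0) with
          | some c => (c.1, c.2.1)
          | none => ((0 : Int), (0 : Int))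
        else ((0 : Int), (0 : Int))).2) := by
  have hfst : (if (List.foldl pvStepA ((0, 0), 0, false, rec0) C).2.2.1 = true
        then "Hay Vaca" else "No Alcanza") =
      (if rec0 - (C.map (fun c => c.2.2)).sum ≤ 0 ∧
          rec0 - (C.map (fun c => c.2.2)).sum ≠ -1000000000000000
        then "Hay Vaca" else "No Alcanza") := by
    by_cases hCe : C = []
    · subst hCe
      simp only [List.foldl_nil, List.map_nil, List.sum_nil]
      rcases hrec with h | h | h <;> subst h <;> norm_num
    · rw [pv_hayA C _ hCe]
      by_cases hcond : rec0 - (C.map (fun c => c.2.2)).sum ≤ 0 ∧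
          rec0 - (C.map (fun c => c.2.2)).sum ≠ -1000000000000000
      · simp [hcond]
      · simp
  have hsnd : (List.foldl pvStepA ((0, 0), 0, false, rec0) C).1 =
      (if 0 < PySem.List.maxD (C.map (fun c => c.2.2)) (fun v => v) 0 then
          match C.find? (fun c => c.2.2 == PySem.List.maxD (C.map (fun c => c.2.2)) (fun v => v) 0) with
          | some c => (c.1, c.2.1)
          | none => ((0 : Int), (0 : Int))
        else ((0 : Int), (0 : Int))) := by
    have harg := pv_argmaxA C (0, 0) 0 false rec0
    cases hvals : C.map (fun c => c.2.2) with
    | nil =>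
        have hCe : C = [] := List.map_eq_nil_iff.mp hvals
        subst hCe
        simp [PySem.List.maxD, PySem.List.max?]
    | cons x t =>
        rw [hvals] at harg
        have hmaxD : PySem.List.maxD (x :: t) (fun v => v) 0 = t.foldl max x := by
          rw [PySem.List.maxD, PySem.List.max?_id_cons]; rfl
        have hM0 : List.foldl max 0 (x :: t) = max 0 (t.foldl max x) := by
          rw [List.foldl_cons]; exact pv_foldl_max_max t 0 x
        rw [hmaxD]
        by_cases hpos : 0 < t.foldl max x
        · rw [if_pos hpos]
          have hMm : List.foldl max 0 (x :: t) = t.foldl max x := by rw [hM0]; omega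
          have hpeq : (fun c : Int × Int × Int => decide ((0 : Int) < c.2.2) &&
                (c.2.2 == List.foldl max 0 (x :: t))) =
              (fun c : Int × Int × Int => c.2.2 == t.foldl max x) := by
            funext c
            rw [hMm]
            by_cases hc : c.2.2 = t.foldl max x
            · rw [hc]; simp [hpos]
            · have h1 : (c.2.2 == t.foldl max x) = false := beq_eq_false_iff_ne.mpr hc
              rw [h1, Bool.and_false]
          rw [hpeq, hMm] at harg
          rcases hfind : C.find? (fun c => c.2.2 == t.foldl max x) with _ | c <;>
            · rw [hfind] at harg
              simp only [hfind]
              exact congrArg Prod.fst harg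
        · rw [if_neg hpos]
          have hMm : List.foldl max 0 (x :: t) = 0 := by rw [hM0]; omega
          have hnone : C.find? (fun c => decide ((0 : Int) < c.2.2) &&
              (c.2.2 == List.foldl max 0 (x :: t))) = none := by
            rw [List.find?_eq_none]
            intro c _
            rw [hMm]
            by_cases hc : c.2.2 = 0
            · rw [hc]; simp
            · have h1 : (c.2.2 == (0 : Int)) = false := beq_eq_false_iff_ne.mpr hc
              rw [h1, Bool.and_false]; simp
          rw [hnone] at harg
          exact congrArg Prod.fst harg
  rw [hfst, hsnd]

-- ===== VERDICT (by name: the statement is the Claim_ definition above) =====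
theorem hacer_la_vaca_spec : Claim_equal_hacer_la_vaca := by
  intro salon vaca _dom
  unfold Spec_hacer_la_vaca
  simp only [hacer_la_vaca, hacer_la_vaca_alt]
  rw [pv_out_cells]
  exact pv_main (pvCells salon) _ (by split_ifs <;> simp)
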